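-- pv_equiv track=rewrite | github.com/hu1111/Sentiment-Analysis_RAM-MGAN | MGAN/data_utils.py | get_word2id
-- ===== SOURCE A (Python) =====
-- def get_word2id(text_all):
--         word2id={}
--         id2word={}
--         idx=1
--         word2id['BLANK']=0
--         id2word[0]='BLANK'
--         for text in text_all:
--                 for word in text:
--                     if word not in word2id:
--                         word2id[word]=idx
--                         id2word[idx]=word
--                         idx+=1
--         word2id['UNKNOW']=len(word2id)+1
--         id2word[len(word2id)+1]='UNKNOW'
--
--         return word2id,id2word
-- ===== SOURCE B (Python) =====
-- def get_word2id(text_all):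
--     # index pass: record each word's first position by overwriting in a reverse scan
--     flat = [w for text in text_all for w in text if w != 'BLANK']
--     first = {}
--     for pos, w in reversed(list(enumerate(flat))):
--         first[w] = pos
--     # sort the distinct words by first-occurrence position to recover id order
--     words = sorted(first, key=first.get)
--     word2id = {'BLANK': 0}
--     id2word = {0: 'BLANK'}
--     for i, w in enumerate(words, 1):
--         word2id[w] = i
--         id2word[i] = w
--     word2id['UNKNOW'] = len(word2id) + 1
--     id2word[len(word2id) + 1] = 'UNKNOW'
--     return word2id, id2word
-- ===== Notes on version B (the rewrite author's own statement) =====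
-- stated objective: alternative
-- what changed: Replaces A's single membership-guarded counting loop by an index-then-sort algorithm: a reverse scan over the enumerated words overwrites a dict so it holds each word's first-occurrence position (no membership test), the distinct words are then sorted by that position to recover id order, and the two dictionaries are assembled positionally; A's exact trailing UNKNOW lines are kept.
import Mathlib
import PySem

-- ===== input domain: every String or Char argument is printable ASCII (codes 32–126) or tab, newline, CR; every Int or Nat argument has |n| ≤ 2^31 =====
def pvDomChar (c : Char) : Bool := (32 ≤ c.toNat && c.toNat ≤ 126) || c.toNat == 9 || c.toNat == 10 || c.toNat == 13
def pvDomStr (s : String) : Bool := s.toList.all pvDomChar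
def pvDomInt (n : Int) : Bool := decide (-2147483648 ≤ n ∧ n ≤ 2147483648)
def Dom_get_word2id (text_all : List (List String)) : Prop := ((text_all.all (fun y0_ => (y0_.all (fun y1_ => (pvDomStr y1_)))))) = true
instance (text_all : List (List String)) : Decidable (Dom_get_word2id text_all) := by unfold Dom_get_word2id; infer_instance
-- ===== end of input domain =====

-- B replaces A's membership-guarded counting pass by a reverse-scan first-position index
-- followed by a sort of the distinct words by that position; same value as A,
-- including A's inconsistent trailing UNKNOW ids.

-- ===== PORT A =====
def stepA (st : PySem.Dict String Int × PySem.Dict Int String × Int) (word : String) :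
    PySem.Dict String Int × PySem.Dict Int String × Int :=
  if st.1.contains word then st
  else (st.1.insert word st.2.2, st.2.1.insert st.2.2 word, st.2.2 + 1)

def get_word2id (text_all : List (List String)) : (List (String × Int)) × (List (Int × String)) :=
  let word2id : PySem.Dict String Int := (PySem.Dict.empty).insert "BLANK" 0
  let id2word : PySem.Dict Int String := (PySem.Dict.empty).insert 0 "BLANK"
  let st := text_all.foldl (fun st text => text.foldl stepA st) (word2id, id2word, (1 : Int))
  let word2id := st.1.insert "UNKNOW" ((st.1.size : Int) + 1)
  let id2word := st.2.1.insert ((word2id.size : Int) + 1) "UNKNOW"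
  (word2id.items, id2word.items)

-- ===== PORT B =====
def stepB (st : PySem.Dict String Int × PySem.Dict Int String) (p : Int × String) :
    PySem.Dict String Int × PySem.Dict Int String :=
  (st.1.insert p.2 p.1, st.2.insert p.1 p.2)

def get_word2id_alt (text_all : List (List String)) : (List (String × Int)) × (List (Int × String)) :=
  let flat := (text_all.flatMap id).filter (fun w => w != "BLANK")
  let first := ((PySem.List.enumerate flat 0).reverse).foldl
      (fun d p => d.insert p.2 p.1) (PySem.Dict.empty : PySem.Dict String Int)
  let words := PySem.List.sorted first.keys (fun w => first.getD w 0) false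
  let st := (PySem.List.enumerate words 1).foldl stepB
      ((PySem.Dict.empty).insert "BLANK" 0, (PySem.Dict.empty).insert 0 "BLANK")
  let word2id := st.1.insert "UNKNOW" ((st.1.size : Int) + 1)
  let id2word := st.2.insert ((word2id.size : Int) + 1) "UNKNOW"
  (word2id.items, id2word.items)

-- ===== PRECONDITION & SPEC =====
def Spec_get_word2id (text_all : List (List String)) (out : (List (String × Int)) × (List (Int × String))) : Prop := out = get_word2id_alt text_all
instance (text_all : List (List String)) (out : (List (String × Int)) × (List (Int × String))) : Decidable (Spec_get_word2id text_all out) := by unfold Spec_get_word2id; infer_instance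

-- ===== CLAIM (what is proved, stated in full; the proofs are below) =====
def Claim_equal_get_word2id : Prop := ∀ (text_all : List (List String)), Dom_get_word2id text_all → Spec_get_word2id text_all (get_word2id text_all)

-- ===== LEMMAS AND PROOFS =====

-- the words of ws not in seen, first occurrences in order
def newWords (ws : List String) (seen : List String) : List String :=
  match ws with
  | [] => []
  | w :: ws => if w ∈ seen then newWords ws seen else w :: newWords ws (w :: seen)

theorem newWords_congr (ws : List String) : ∀ s s', (∀ x, x ∈ s ↔ x ∈ s') →
    newWords ws s = newWords ws s' := by
  induction ws with
  | nil => intro s s' _; rfl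
  | cons w ws ih =>
    intro s s' h
    simp only [newWords]
    by_cases hw : w ∈ s
    · rw [if_pos hw, if_pos ((h w).1 hw)]; exact ih s s' h
    · rw [if_neg hw, if_neg (fun hc => hw ((h w).2 hc))]
      congr 1
      exact ih _ _ (fun x => by simp [h x])

theorem newWords_filter (ws : List String) : ∀ s,
    newWords ws (s ++ ["BLANK"]) = newWords (ws.filter (fun w => w != "BLANK")) s := by
  induction ws with
  | nil => intro s; rfl
  | cons w ws ih =>
    intro s
    by_cases hb : w = "BLANK"
    · subst hb
      simp only [newWords, List.filter_cons, bne_self_eq_false, if_pos (by simp : "BLANK" ∈ s ++ ["BLANK"])]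
      exact ih s
    · simp only [List.filter_cons, bne_iff_ne, ne_eq, hb, not_false_eq_true, if_true, newWords]
      by_cases hw : w ∈ s
      · rw [if_pos (by simp [hw]), if_pos hw]; exact ih s
      · rw [if_neg (by simp [hw, hb]), if_neg hw]
        congr 1
        exact ih (w :: s)

theorem foldl_add_eq_append_newWords (l : List String) : ∀ s,
    l.foldl PySem.Set.add s = s ++ newWords l s := by
  induction l with
  | nil => intro s; simp [newWords]
  | cons x l ih =>
    intro s
    by_cases hx : x ∈ s
    · simp only [List.foldl_cons, PySem.Set.add_of_mem hx, newWords, if_pos hx]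
      exact ih s
    · simp only [List.foldl_cons, PySem.Set.add_of_not_mem hx, newWords, if_neg hx]
      rw [ih (s ++ [x]), newWords_congr l (s ++ [x]) (x :: s) (fun y => by simp [or_comm])]
      simp

theorem dedup_eq_newWords (l : List String) : PySem.List.dedup l = newWords l [] := by
  have := foldl_add_eq_append_newWords l []
  simpa [PySem.List.dedup, PySem.Set.ofList] using this

-- A's guarded loop equals B's enumeration of the fresh words
theorem core (ws : List String) : ∀ (d1 : PySem.Dict String Int) (d2 : PySem.Dict Int String) (idx : Int),
    ws.foldl stepA (d1, d2, idx) =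
      (((PySem.List.enumerate (newWords ws d1.keys) idx).foldl stepB (d1, d2)).1,
       ((PySem.List.enumerate (newWords ws d1.keys) idx).foldl stepB (d1, d2)).2,
       idx + (newWords ws d1.keys).length) := by
  induction ws with
  | nil => intro d1 d2 idx; simp [newWords]
  | cons w ws ih =>
    intro d1 d2 idx
    by_cases hw : d1.contains w
    · have hmem : w ∈ d1.keys := (PySem.Dict.contains_iff_mem_keys d1 w).1 hw
      simp only [List.foldl_cons, stepA, if_pos hw, newWords, if_pos hmem]
      exact ih d1 d2 idx
    · have hmem : w ∉ d1.keys := fun h => hw ((PySem.Dict.contains_iff_mem_keys d1 w).2 h)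
      simp only [List.foldl_cons, stepA, if_neg hw, newWords, if_neg hmem,
        PySem.List.enumerate_cons, stepB]
      rw [ih (d1.insert w idx) (d2.insert idx w) (idx + 1)]
      rw [PySem.Dict.keys_insert_of_not_contains (h := by simpa using hw),
        newWords_congr ws (d1.keys ++ [w]) (w :: d1.keys) (fun y => by simp [or_comm])]
      simp only [Prod.mk.injEq, List.length_cons]
      refine ⟨trivial, trivial, by push_cast; ring⟩

-- the reverse-scan index dict: first match of l wins
theorem revfold_get? (l : List (Int × String)) : ∀ (d : PySem.Dict String Int) (w : String),
    ((l.reverse.foldl (fun d p => d.insert p.2 p.1) d).get? w) =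
      match l.find? (fun p => p.2 == w) with
      | some p => some p.1
      | none => d.get? w := by
  induction l with
  | nil => intro d w; rfl
  | cons p t ih =>
    intro d w
    simp only [List.reverse_cons, List.foldl_append, List.foldl_cons, List.foldl_nil,
      List.find?_cons]
    by_cases hw : p.2 = w
    · simp [hw, PySem.Dict.get?_insert_self]
    · rw [PySem.Dict.get?_insert_of_ne (hne := Ne.symm hw)]
      have : (p.2 == w) = false := by simp [hw]
      rw [this]
      exact ih d w

theorem find?_enumerate (xs : List String) : ∀ (s : Int) (w : String), w ∈ xs →
    (PySem.List.enumerate xs s).find? (fun p => p.2 == w) = some (s + xs.idxOf w, w) := by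
  induction xs with
  | nil => intro s w h; simp at h
  | cons x t ih =>
    intro s w h
    rw [PySem.List.enumerate_cons, List.find?_cons]
    by_cases hx : x = w
    · have : ((s, x).2 == w) = true := by simp [hx]
      rw [this, hx, List.idxOf_cons_self]
      simp
    · have : ((s, x).2 == w) = false := by simp [hx]
      rw [this, ih (s+1) w (by cases h with | head => exact absurd rfl hx | tail _ h => exact h),
        List.idxOf_cons_ne _ (by exact hx)]
      show some (s + 1 + (List.idxOf w t : Int), w) = _
      simp only [Option.some.injEq, Prod.mk.injEq, Nat.succ_eq_add_one]
      exact ⟨by push_cast; ring, trivial⟩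

-- dedup lists first occurrences in strictly increasing position order
theorem mem_newWords_not_seen (xs : List String) : ∀ (seen : List String) (w : String),
    w ∈ newWords xs seen → w ∈ xs ∧ w ∉ seen := by
  induction xs with
  | nil => intro seen w h; simp [newWords] at h
  | cons x t ih =>
    intro seen w h
    simp only [newWords] at h
    by_cases hx : x ∈ seen
    · rw [if_pos hx] at h
      obtain ⟨h1, h2⟩ := ih seen w h
      exact ⟨List.mem_cons_of_mem _ h1, h2⟩
    · rw [if_neg hx] at h
      rw [List.mem_cons] at h
      rcases h with h | h
      · subst h; exact ⟨List.mem_cons_self, hx⟩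
      · obtain ⟨h1, h2⟩ := ih (x :: seen) w h
        exact ⟨List.mem_cons_of_mem _ h1, fun hc => h2 (List.mem_cons_of_mem _ hc)⟩

theorem newWords_pairwise_idxOf (xs : List String) : ∀ (pre seen : List String),
    (∀ w ∈ pre, w ∈ seen) →
    (newWords xs seen).Pairwise (fun a b => (pre ++ xs).idxOf a < (pre ++ xs).idxOf b) := by
  induction xs with
  | nil => intro pre seen _; simp [newWords]
  | cons x t ih =>
    intro pre seen hps
    simp only [newWords]
    by_cases hx : x ∈ seen
    · rw [if_pos hx]
      have := ih (pre ++ [x]) seen (by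
        intro w hw
        rcases List.mem_append.1 hw with h | h
        · exact hps w h
        · simp at h; subst h; exact hx)
      simpa using this
    · rw [if_neg hx]
      have hxpre : x ∉ pre := fun hc => hx (hps x hc)
      constructor
      · intro b hb
        obtain ⟨hbt, hbs⟩ := mem_newWords_not_seen t (x :: seen) b hb
        have hbx : b ≠ x := fun hc => hbs (by simp [hc])
        have hbpre : b ∉ pre := fun hc => hbs (List.mem_cons_of_mem _ (hps b hc))
        rw [List.idxOf_append_of_notMem hxpre, List.idxOf_append_of_notMem hbpre,
          List.idxOf_cons_self, List.idxOf_cons_ne _ (Ne.symm hbx)]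
        omega
      · have := ih (pre ++ [x]) (x :: seen) (by
          intro w hw
          rcases List.mem_append.1 hw with h | h
          · exact List.mem_cons_of_mem _ (hps w h)
          · simp at h; subst h; exact List.mem_cons_self)
        simpa using this

-- B's index-then-sort pass produces the ordered dedup
theorem sort_eq_dedup (g : List String) :
    (let first := ((PySem.List.enumerate g 0).reverse).foldl
        (fun d p => d.insert p.2 p.1) (PySem.Dict.empty : PySem.Dict String Int)
     PySem.List.sorted first.keys (fun w => first.getD w 0) false) = PySem.List.dedup g := by
  dsimp only
  set first := ((PySem.List.enumerate g 0).reverse).foldl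
      (fun d p => d.insert p.2 p.1) (PySem.Dict.empty : PySem.Dict String Int) with hf
  have hkeys : first.keys = PySem.Set.ofList g.reverse := by
    have h := PySem.Dict.keys_foldl_insert_key ((PySem.List.enumerate g 0).reverse)
      (fun p => p.2) (fun _ p => p.1) (PySem.Dict.empty : PySem.Dict String Int)
    rw [hf, h]
    rw [show List.map (fun p => (p : Int × String).2) (PySem.List.enumerate g 0).reverse
        = g.reverse by rw [List.map_reverse, PySem.List.map_snd_enumerate]]
    rfl
  have hmemk : ∀ w, w ∈ first.keys ↔ w ∈ g := by
    intro w; rw [hkeys, PySem.Set.mem_ofList, List.mem_reverse]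
  have hnodk : first.keys.Nodup := by
    rw [hkeys]; exact PySem.Set.nodup_ofList _
  have hgetD : ∀ w ∈ g, first.getD w 0 = (g.idxOf w : Int) := by
    intro w hw
    have hget : first.get? w = some (g.idxOf w : Int) := by
      rw [hf, revfold_get?, find?_enumerate g 0 w hw]
      simp
    simp [PySem.Dict.getD, hget]
  have hperm : (PySem.List.dedup g).Perm first.keys := by
    rw [List.perm_ext_iff_of_nodup (PySem.List.nodup_dedup g) hnodk]
    intro a
    rw [PySem.List.mem_dedup, hmemk]
  have hpw : (PySem.List.dedup g).Pairwise
      (fun a b => first.getD a 0 < first.getD b 0) := by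
    have h0 := newWords_pairwise_idxOf g [] [] (by simp)
    rw [← dedup_eq_newWords] at h0
    simp only [List.nil_append] at h0
    refine List.Pairwise.imp_of_mem ?_ h0
    intro a b ha hb hab
    have hag : a ∈ g := (PySem.List.mem_dedup g a).1 ha
    have hbg : b ∈ g := (PySem.List.mem_dedup g b).1 hb
    rw [hgetD a hag, hgetD b hbg]
    exact_mod_cast hab
  exact PySem.List.sorted_eq_of_perm_of_pairwise_lt first.keys (PySem.List.dedup g) _ hperm hpw

-- ===== VERDICT (by name: the statement is the Claim_ definition above) =====
theorem get_word2id_spec : Claim_equal_get_word2id := by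
  intro text_all _
  unfold Spec_get_word2id get_word2id get_word2id_alt
  dsimp only
  rw [← List.foldl_flatten, core, List.flatMap_id, sort_eq_dedup]
  have hk : ((PySem.Dict.empty : PySem.Dict String Int).insert "BLANK" 0).keys = ["BLANK"] := by decide
  rw [hk, show (["BLANK"] : List String) = [] ++ ["BLANK"] from rfl, newWords_filter,
    ← dedup_eq_newWords]
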